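-- pv_equiv track=rewrite | github.com/TheNoobBot/FLCD | lab3/tokenizer.py | separate_strings
-- ===== SOURCE A (Python) =====
-- def separate_strings(program):
--     strings = []
--     separated = ""
--     string = ""
--     string_started = False
--     index = 0
--     for char in program:
--         if char == "\"" or char == "\'":
--             if not string_started:
--                 string = f"{char}"
--                 string_started = True
--             else:
--                 string += f"{char}"
--                 strings.append(string)
--                 string_started = False
--                 separated += f"${index}$"
--                 index += 1
--
--         elif string_started:
--             string += char
--         else:
--             separated += char
--     return separated, strings
-- ===== SOURCE B (Python) =====
-- def separate_strings(program):
--     # Scan by jumping from quote to quote: find the next two quote characters,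
--     # emit the text before them and the literal between them, repeat on the rest.
--     separated = []
--     strings = []
--     rest = program
--     while True:
--         q = _quote_pos(rest)
--         if q is None:
--             separated.append(rest)
--             break
--         q2 = _quote_pos(rest[q + 1:])
--         if q2 is None:
--             separated.append(rest[:q])  # unterminated literal: dropped
--             break
--         separated.append(rest[:q])
--         separated.append(f"${len(strings)}$")
--         strings.append(rest[q:q + q2 + 2])
--         rest = rest[q + q2 + 2:]
--     return "".join(separated), strings
--
--
-- def _quote_pos(s):
--     for i, c in enumerate(s):
--         if c == '"' or c == "'":
--             return i
--     return None
-- ===== Notes on version B (the rewrite author's own statement) =====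
-- stated objective: alternative
-- what changed: Replaces A's char-by-char state machine (string_started flag, char-wise string concatenation) by a jump-scan that repeatedly locates the next two quote characters and slices out the preceding text and the literal in one step.
import Mathlib
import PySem

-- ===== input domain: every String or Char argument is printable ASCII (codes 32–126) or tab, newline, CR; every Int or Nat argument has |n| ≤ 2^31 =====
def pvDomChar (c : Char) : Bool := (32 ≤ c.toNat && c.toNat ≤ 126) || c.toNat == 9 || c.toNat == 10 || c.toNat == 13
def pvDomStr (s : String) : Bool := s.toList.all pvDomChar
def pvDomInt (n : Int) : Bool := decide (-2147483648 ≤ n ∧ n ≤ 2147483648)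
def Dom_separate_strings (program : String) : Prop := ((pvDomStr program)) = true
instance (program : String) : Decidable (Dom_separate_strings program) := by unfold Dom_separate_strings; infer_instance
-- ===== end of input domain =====

-- B replaces A's char-by-char state machine by a jump-scan over quote positions; alternative decomposition, same behaviour.

-- shared formatting helper: f"${i}$" (both Pythons build this literal the same way)
def pvPlaceholder (i : Int) : List Char := '$' :: (PySem.Int.toStr i).toList ++ ['$']

-- ===== PORT A =====
-- state = (separated, strings, string, string_started, index); the loop body, branch for branch.
-- Strings are carried as List Char (exact: Lean's String ops are opaque); concatenations are exactly A's `+=`.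
def sepAgo : List Char → (List Char × List (List Char) × List Char × Bool × Int) →
    (List Char × List (List Char) × List Char × Bool × Int)
  | [], st => st
  | c :: cs, (sep, strs, str, started, idx) =>
    if c = '"' ∨ c = '\'' then
      if !started then sepAgo cs (sep, strs, [c], true, idx)
      else sepAgo cs (sep ++ pvPlaceholder idx, strs ++ [str ++ [c]], str ++ [c], false, idx + 1)
    else if started then sepAgo cs (sep, strs, str ++ [c], started, idx)
    else sepAgo cs (sep ++ [c], strs, str, started, idx)

def separate_strings (program : String) : String × List String :=
  (String.ofList (sepAgo program.toList ([], [], [], false, 0)).1,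
   (sepAgo program.toList ([], [], [], false, 0)).2.1.map String.ofList)

-- ===== PORT B =====
-- _quote_pos: index of the first quote character, None if there is none
def quotePos : List Char → Option Nat
  | [] => none
  | c :: cs => if c = '"' ∨ c = '\'' then some 0 else (quotePos cs).map (· + 1)

theorem quotePos_some_pos {cs : List Char} {q : Nat} (h : quotePos cs = some q) :
    0 < cs.length := by
  cases cs with
  | nil => simp [quotePos] at h
  | cons c cs => simp

-- the while-loop of B: `rest` shrinks by slicing; the slices rest[:q], rest[q:q+q2+2], rest[q+q2+2:]
-- are exact as take/drop because all indices involved are nonnegative.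
def sepBgo (cs : List Char) (sep : List (List Char)) (strs : List (List Char)) :
    List (List Char) × List (List Char) :=
  match h : quotePos cs with
  | none => (sep ++ [cs], strs)
  | some q =>
    match quotePos (cs.drop (q + 1)) with
    | none => (sep ++ [cs.take q], strs)
    | some q2 =>
      sepBgo (cs.drop (q + q2 + 2))
        (sep ++ [cs.take q, pvPlaceholder (strs.length : Int)])
        (strs ++ [(cs.drop q).take (q2 + 2)])
  termination_by cs.length
  decreasing_by
    have := quotePos_some_pos h
    simp only [List.length_drop]; omega

def separate_strings_alt (program : String) : String × List String :=
  (String.ofList (sepBgo program.toList [] []).1.flatten,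
   (sepBgo program.toList [] []).2.map String.ofList)

-- ===== PRECONDITION & SPEC =====
def Spec_separate_strings (program : String) (out : String × List String) : Prop := out = separate_strings_alt program
instance (program : String) (out : String × List String) : Decidable (Spec_separate_strings program out) := by unfold Spec_separate_strings; infer_instance

-- ===== CLAIM (what is proved, stated in full; the proofs are below) =====
def Claim_equal_separate_strings : Prop := ∀ (program : String), Dom_separate_strings program → Spec_separate_strings program (separate_strings program)

-- ===== LEMMAS AND PROOFS =====

-- A's loop processes concatenated input piecewise
theorem sepAgo_append (l1 l2 : List Char) :
    ∀ st, sepAgo (l1 ++ l2) st = sepAgo l2 (sepAgo l1 st) := by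
  induction l1 with
  | nil => intro st; simp [sepAgo]
  | cons c l1 ih =>
    intro st
    obtain ⟨sep, strs, str, started, idx⟩ := st
    simp only [List.cons_append, sepAgo]
    split_ifs <;> apply ih

-- quote-free run, unstarted state: A just copies the chars to `separated`
theorem sepAgo_nq_false (cs : List Char) (h : quotePos cs = none) :
    ∀ sep strs g i, sepAgo cs (sep, strs, g, false, i) = (sep ++ cs, strs, g, false, i) := by
  induction cs with
  | nil => simp [sepAgo]
  | cons c cs ih =>
    intro sep strs g i
    by_cases hc : c = '"' ∨ c = '\''
    · simp [quotePos, hc] at h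
    · simp only [quotePos, hc, ite_false, Option.map_eq_none_iff] at h
      simp [sepAgo, hc, ih h]

-- quote-free run, started state: A accumulates the chars into `string`
theorem sepAgo_nq_true (cs : List Char) (h : quotePos cs = none) :
    ∀ sep strs g i, sepAgo cs (sep, strs, g, true, i) = (sep, strs, g ++ cs, true, i) := by
  induction cs with
  | nil => simp [sepAgo]
  | cons c cs ih =>
    intro sep strs g i
    by_cases hc : c = '"' ∨ c = '\''
    · simp [quotePos, hc] at h
    · simp only [quotePos, hc, ite_false, Option.map_eq_none_iff] at h
      simp [sepAgo, hc, ih h]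

-- characterisation of quotePos = some q: a quote-free prefix of length q followed by a quote
theorem quotePos_eq_some {cs : List Char} {q : Nat} (h : quotePos cs = some q) :
    quotePos (cs.take q) = none ∧ (cs.take q).length = q ∧
      ∃ c rest, cs.drop q = c :: rest ∧ (c = '"' ∨ c = '\'') := by
  induction cs generalizing q with
  | nil => simp [quotePos] at h
  | cons c cs ih =>
    by_cases hc : c = '"' ∨ c = '\''
    · simp [quotePos, hc] at h
      subst h
      exact ⟨by simp [quotePos], by simp, c, cs, by simp, hc⟩
    · simp only [quotePos, hc, ite_false] at h
      cases hq : quotePos cs with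
      | none => simp [hq] at h
      | some q' =>
        simp [hq] at h
        subst h
        obtain ⟨h1, hl, c', rest, h3, h4⟩ := ih hq
        exact ⟨by simp [quotePos, hc, h1], by simp [hl], c', rest, by simpa using h3, h4⟩

-- unfolding equations for sepBgo's three cases
theorem sepBgo_none {cs : List Char} (h : quotePos cs = none) (sep strs : List (List Char)) :
    sepBgo cs sep strs = (sep ++ [cs], strs) := by
  rw [sepBgo.eq_def]
  split <;> simp_all

theorem sepBgo_one {cs : List Char} {q : Nat} (h : quotePos cs = some q)
    (h2 : quotePos (cs.drop (q + 1)) = none) (sep strs : List (List Char)) :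
    sepBgo cs sep strs = (sep ++ [cs.take q], strs) := by
  rw [sepBgo.eq_def]
  split
  · simp_all
  · next q' hq' =>
    rw [h] at hq'
    cases hq'
    split <;> simp_all

theorem sepBgo_two {cs : List Char} {q q2 : Nat} (h : quotePos cs = some q)
    (h2 : quotePos (cs.drop (q + 1)) = some q2) (sep strs : List (List Char)) :
    sepBgo cs sep strs = sepBgo (cs.drop (q + q2 + 2))
      (sep ++ [cs.take q, pvPlaceholder (strs.length : Int)])
      (strs ++ [(cs.drop q).take (q2 + 2)]) := by
  rw [sepBgo.eq_def]
  split
  · simp_all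
  · next q' hq' =>
    rw [h] at hq'
    cases hq'
    split <;> simp_all

-- main invariant: A's fold from an unstarted state whose index equals the number of
-- strings already collected computes exactly what B's jump-scan computes
theorem main_inv : ∀ (cs : List Char) (sep strs : List (List Char)), ∀ g : List Char,
    ((sepAgo cs (sep.flatten, strs, g, false, (strs.length : Int))).1,
      (sepAgo cs (sep.flatten, strs, g, false, (strs.length : Int))).2.1)
    = ((sepBgo cs sep strs).1.flatten, (sepBgo cs sep strs).2) := by
  intro cs sep strs
  induction cs, sep, strs using sepBgo.induct with
  | case1 cs sep strs h =>
    intro g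
    rw [sepBgo_none h, sepAgo_nq_false cs h]
    simp
  | case2 cs sep strs q h h2 =>
    intro g
    obtain ⟨hpre, hlen, c, rest, hdrop, hq⟩ := quotePos_eq_some h
    have hrest : cs.drop (q + 1) = rest := by
      have h' := congrArg (List.drop 1) hdrop
      simpa [List.drop_drop, Nat.add_comm] using h'
    have h2' : quotePos rest = none := by rw [← hrest]; exact h2
    rw [sepBgo_one h h2]
    conv_lhs => rw [show cs = cs.take q ++ c :: rest from by rw [← hdrop]; simp]
    rw [sepAgo_append, sepAgo_nq_false _ hpre]
    simp only [sepAgo, hq, Bool.not_false, if_pos]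
    rw [sepAgo_nq_true rest h2']
    simp
  | case3 cs sep strs q h q2 h2 ih =>
    intro g
    obtain ⟨hpre, hlen, c, rest, hdrop, hq⟩ := quotePos_eq_some h
    have hrest : cs.drop (q + 1) = rest := by
      have h' := congrArg (List.drop 1) hdrop
      simpa [List.drop_drop, Nat.add_comm] using h'
    have h2' : quotePos rest = some q2 := by rw [← hrest]; exact h2
    obtain ⟨hmid, hlen2, c2, r2, hdrop2, hq2⟩ := quotePos_eq_some h2'
    have hr2 : cs.drop (q + q2 + 2) = r2 := by
      have e1 : cs.drop (q + q2 + 2) = (cs.drop (q + 1)).drop (q2 + 1) := by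
        rw [List.drop_drop]
        congr 1
        omega
      have e2 : rest.drop (q2 + 1) = (rest.drop q2).drop 1 := by
        rw [List.drop_drop]
      rw [e1, hrest, e2, hdrop2]
      rfl
    have hlit : (cs.drop q).take (q2 + 2) = c :: (rest.take q2 ++ [c2]) := by
      rw [hdrop]
      conv_lhs => rw [show rest = rest.take q2 ++ c2 :: r2 from by rw [← hdrop2]; simp]
      simp only [List.take_succ_cons]
      congr 1
      rw [show q2 + 1 = (rest.take q2).length + 1 from by rw [hlen2],
        List.take_length_add_append]
      rfl
    rw [sepBgo_two h h2, hlit, hr2]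
    rw [hlit, hr2] at ih
    conv_lhs => rw [show cs = cs.take q ++ c :: rest from by rw [← hdrop]; simp]
    rw [sepAgo_append, sepAgo_nq_false _ hpre]
    simp only [sepAgo, hq, Bool.not_false, if_pos]
    conv_lhs => rw [show rest = rest.take q2 ++ c2 :: r2 from by rw [← hdrop2]; simp]
    rw [sepAgo_append, sepAgo_nq_true _ hmid]
    simp only [sepAgo, hq2, Bool.not_true, if_pos]
    have harg :
        (sep.flatten ++ cs.take q ++ pvPlaceholder (strs.length : Int),
          strs ++ [[c] ++ rest.take q2 ++ [c2]], [c] ++ rest.take q2 ++ [c2], false,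
          (strs.length : Int) + 1)
        = ((sep ++ [cs.take q, pvPlaceholder (strs.length : Int)]).flatten,
            strs ++ [c :: (rest.take q2 ++ [c2])], [c] ++ rest.take q2 ++ [c2], false,
            ((strs ++ [c :: (rest.take q2 ++ [c2])]).length : Int)) := by
      simp
    rw [harg]
    exact ih ([c] ++ rest.take q2 ++ [c2])

-- ===== VERDICT (by name: the statement is the Claim_ definition above) =====
theorem separate_strings_spec : Claim_equal_separate_strings := by
  intro program _
  unfold Spec_separate_strings separate_strings separate_strings_alt
  have h := main_inv program.toList [] [] []
  simp only [List.flatten_nil, List.length_nil, Int.natCast_zero, Prod.mk.injEq] at h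
  rw [h.1, h.2]
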